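-- pv_equiv track=rewrite | github.com/sammyzord/interview-prep | questions/question2.py | find_first_peak
-- ===== SOURCE A (Python) =====
-- def find_first_peak(x: list[int]) -> int:
--     y = [x[0], 0]
--     for i, z in enumerate(x):
--         if z > y[0]:
--             y[0] = z
--             y[1] = i
--         if z < y[0]:
--             break
--     return y[1]
-- ===== SOURCE B (Python) =====
-- def find_first_peak(x: list[int]) -> int:
--     # Two-pass: locate the value just before the first descent (or the last
--     # element if the list is nondecreasing), then return its first occurrence.
--     v = x[-1]
--     for prev, cur in zip(x, x[1:]):
--         if cur < prev:
--             v = prev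
--             break
--     return x.index(v)
-- ===== Notes on version B (the rewrite author's own statement) =====
-- stated objective: alternative
-- what changed: Replaces A's single fused running-max/argmax scan (mutable [max,index] pair with in-loop break) by a two-pass method: an adjacent-pair scan over zip(x, x[1:]) that only finds the peak VALUE before the first descent, followed by a separate first-occurrence lookup x.index(v).
import Mathlib
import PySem

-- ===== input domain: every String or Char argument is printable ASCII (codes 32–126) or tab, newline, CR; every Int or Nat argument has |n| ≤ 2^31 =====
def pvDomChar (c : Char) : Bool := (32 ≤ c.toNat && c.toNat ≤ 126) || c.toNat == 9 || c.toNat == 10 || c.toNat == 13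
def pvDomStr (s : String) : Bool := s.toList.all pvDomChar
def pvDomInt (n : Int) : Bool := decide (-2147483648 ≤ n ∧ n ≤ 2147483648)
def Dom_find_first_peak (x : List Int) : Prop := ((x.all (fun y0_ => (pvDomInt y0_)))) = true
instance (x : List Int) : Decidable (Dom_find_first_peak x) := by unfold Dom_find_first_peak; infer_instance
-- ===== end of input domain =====

-- value with an adjacent-pair scan, then a separate first-occurrence lookup (alternative, same cost).

-- ===== PORT A =====
-- for i, z in enumerate(x): running state y = [y0, y1]; break returns y1
def findFirstPeakLoopA : List (Int × Int) → Int → Int → Int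
  | [], _, y1 => y1
  | (i, z) :: rest, y0, y1 =>
    let y0' := if z > y0 then z else y0
    let y1' := if z > y0 then i else y1
    if z < y0' then y1' else findFirstPeakLoopA rest y0' y1'

def find_first_peak (x : List Int) : Int :=
  match PySem.List.pyGet? x 0 with
  | none => 0   -- Python raises IndexError here (x = []); excluded by Pre_
  | some x0 => findFirstPeakLoopA (PySem.List.enumerate x 0) x0 0

-- ===== PORT B =====
-- for prev, cur in zip(x, x[1:]): first descent's prev, else x[-1]
def findFirstPeakDescent : List (Int × Int) → Int → Int
  | [], v => v
  | (prev, cur) :: rest, v => if cur < prev then prev else findFirstPeakDescent rest v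

def find_first_peak_alt (x : List Int) : Int :=
  let v := findFirstPeakDescent (x.zip (PySem.List.slice x (some 1) none))
             ((PySem.List.pyGet? x (-1)).getD 0)   -- x[-1]; none only for x = [], excluded by Pre_
  ((PySem.List.index? x v).getD 0 : Nat)

-- ===== PRECONDITION & SPEC =====
-- Python A raises IndexError on the empty list (x[0]); B raises there too (x[-1]).
def Pre_find_first_peak (x : List Int) : Prop := x ≠ []
instance (x : List Int) : Decidable (Pre_find_first_peak x) := by unfold Pre_find_first_peak; infer_instance
def pvWitness_find_first_peak : List Int := [1, 3, 3, 2]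

def Spec_find_first_peak (x : List Int) (out : Int) : Prop := out = find_first_peak_alt x
instance (x : List Int) (out : Int) : Decidable (Spec_find_first_peak x out) := by unfold Spec_find_first_peak; infer_instance

-- ===== CLAIM (what is proved, stated in full; the proofs are below) =====
def Claim_equal_find_first_peak : Prop := ∀ (x : List Int), Dom_find_first_peak x → Pre_find_first_peak x → Spec_find_first_peak x (find_first_peak x)

-- ===== LEMMAS AND PROOFS =====
lemma fpk_descent_mem (l : List (Int × Int)) (d : Int) :
    findFirstPeakDescent l d = d ∨ ∃ p ∈ l, findFirstPeakDescent l d = p.1 := by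
  induction l with
  | nil => exact Or.inl rfl
  | cons p t ih =>
    by_cases h : p.2 < p.1
    · exact Or.inr ⟨p, List.mem_cons_self, by simp [findFirstPeakDescent, h]⟩
    · rcases ih with h1 | ⟨q, hq, hq2⟩
      · exact Or.inl (by simp [findFirstPeakDescent, h, h1])
      · exact Or.inr ⟨q, List.mem_cons_of_mem _ hq, by simp [findFirstPeakDescent, h, hq2]⟩

lemma fpk_index_getD (xs : List Int) (v : Int) (h : v ∈ xs) :
    ((PySem.List.index? xs v).getD 0 : Int) = (xs.idxOf v : Int) := by
  rcases Option.isSome_iff_exists.mp ((PySem.List.index?_isSome_iff xs v).mpr h) with ⟨k, hk⟩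
  have h2 := List.idxOf_eq_getD_idxOf? v xs
  rw [← PySem.List.index?_eq_idxOf?, hk] at h2
  rw [hk, h2]
  simp

lemma fpk_key (x : List Int) (d : Int) (hd : x.getLast? = some d) :
    ∀ (s done : List Int) (m : Int), x = done ++ s → done.getLast? = some m →
    (∀ a ∈ done, a ≤ m) →
    findFirstPeakLoopA (PySem.List.enumerate s (done.length : Int)) m (x.idxOf m : Int)
      = (x.idxOf (findFirstPeakDescent ((m :: s).zip s) d) : Int) := by
  intro s
  induction s with
  | nil =>
    intro done m hx hlast _
    have hdm : d = m := by
      rw [hx, List.append_nil] at hd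
      rw [hd] at hlast; exact Option.some_inj.mp hlast
    simp [PySem.List.enumerate, findFirstPeakLoopA, findFirstPeakDescent, hdm]
  | cons z t ih =>
    intro done m hx hlast hle
    rw [PySem.List.enumerate_cons]
    by_cases h1 : z < m
    · simp [findFirstPeakLoopA, findFirstPeakDescent, h1, not_lt.mpr (le_of_lt h1)]
    · by_cases h2 : m < z
      · have hz : z ∉ done := fun hmem => absurd (hle z hmem) (not_le.mpr h2)
        have hidx : (x.idxOf z : Int) = (done.length : Int) := by
          rw [hx, List.idxOf_append_of_notMem hz, List.idxOf_cons_self]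
          simp
        have hstep := ih (done ++ [z]) z
          (by rw [hx, List.append_assoc]; rfl)
          List.getLast?_concat
          (by intro a ha
              rcases List.mem_append.mp ha with ha | ha
              · exact le_of_lt (lt_of_le_of_lt (hle a ha) h2)
              · simp at ha; simp [ha])
        rw [List.length_append] at hstep
        simp only [List.length_singleton] at hstep
        push_cast at hstep
        simp only [findFirstPeakLoopA, List.zip_cons_cons, findFirstPeakDescent, if_pos h2,
          if_neg (lt_irrefl z), if_neg h1]
        rw [hidx] at hstep
        exact hstep
      · have hzm : z = m := le_antisymm (not_lt.mp h2) (not_lt.mp h1)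
        subst hzm
        have hstep := ih (done ++ [z]) z
          (by rw [hx, List.append_assoc]; rfl)
          List.getLast?_concat
          (by intro a ha
              rcases List.mem_append.mp ha with ha | ha
              · exact hle a ha
              · simp at ha; simp [ha])
        rw [List.length_append] at hstep
        simp only [List.length_singleton] at hstep
        push_cast at hstep
        simp only [findFirstPeakLoopA, List.zip_cons_cons, findFirstPeakDescent,
          if_neg (lt_irrefl z)]
        exact hstep

theorem fpk_main : ∀ (x : List Int), x ≠ [] → find_first_peak x = find_first_peak_alt x := by
  intro x hx
  cases x with
  | nil => exact absurd rfl hx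
  | cons x0 rest =>
    have hd : (x0 :: rest).getLast? = some ((x0 :: rest).getLast (List.cons_ne_nil x0 rest)) :=
      List.getLast?_eq_some_getLast _
    set d := (x0 :: rest).getLast (List.cons_ne_nil x0 rest) with hdd
    have hA : find_first_peak (x0 :: rest)
        = findFirstPeakLoopA (PySem.List.enumerate rest 1) x0 0 := by
      simp only [find_first_peak]
      rw [show PySem.List.pyGet? (x0 :: rest) 0 = some x0 by
        simp [PySem.List.pyGet?, PySem.List.pyIdx?]]
      rw [PySem.List.enumerate_cons]
      simp [findFirstPeakLoopA]
    have hB : find_first_peak_alt (x0 :: rest)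
        = ((PySem.List.index? (x0 :: rest)
              (findFirstPeakDescent ((x0 :: rest).zip rest) d)).getD 0 : Nat) := by
      simp only [find_first_peak_alt]
      rw [PySem.List.slice_from_one]
      simp only [List.tail_cons]
      rw [show PySem.List.pyGet? (x0 :: rest) (-1) = some d by
        simp [pysem, hdd, List.getLast_eq_getElem]
        rfl]
      rfl
    have hmem : findFirstPeakDescent ((x0 :: rest).zip rest) d ∈ (x0 :: rest) := by
      rcases fpk_descent_mem ((x0 :: rest).zip rest) d with h | ⟨p, hp, hp2⟩
      · rw [h, hdd]; exact List.getLast_mem _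
      · rw [hp2]; exact (List.of_mem_zip hp).1
    have hkey := fpk_key (x0 :: rest) d hd rest [x0] x0 rfl rfl
      (by intro a ha; simp at ha; simp [ha])
    simp only [List.length_singleton, Nat.cast_one, List.idxOf_cons_self, Nat.cast_zero] at hkey
    rw [hA, hB, hkey, fpk_index_getD _ _ hmem]

-- ===== VERDICT (by name: the statement is the Claim_ definition above) =====
theorem find_first_peak_spec : Claim_equal_find_first_peak := by
  intro x _ hpre
  unfold Spec_find_first_peak
  exact fpk_main x hpre
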